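-- pv_equiv track=rewrite | github.com/dmitry-ulyanichev/godmodetoday | breedrust/services/compute.py | remove_duplicates
-- ===== SOURCE A (Python) =====
-- def remove_duplicates(data):
--     unique_values = {}
--
--     for key, value in data.items():
--         if value not in unique_values:
--             unique_values[value] = key
--         else:
--             current_key = key
--             existing_key = unique_values[value]
--
--             if len(current_key) < len(existing_key):
--                 unique_values[value] = current_key
--
--     unique_data = {key: value for value, key in unique_values.items()}
--
--     return unique_data
-- ===== SOURCE B (Python) =====
-- def remove_duplicates(data):
--     groups = {}
--     for key, value in data.items():
--         groups.setdefault(value, []).append(key)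
--     return {min(keys, key=len): value for value, keys in groups.items()}
-- ===== Notes on version B (the rewrite author's own statement) =====
-- stated objective: alternative
-- what changed: A keeps one best-so-far shortest key per value while scanning; B first groups all keys by value in one pass and then, in a second pass over the groups, picks min(keys, key=len) (earliest among the shortest) per group.
import Mathlib
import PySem

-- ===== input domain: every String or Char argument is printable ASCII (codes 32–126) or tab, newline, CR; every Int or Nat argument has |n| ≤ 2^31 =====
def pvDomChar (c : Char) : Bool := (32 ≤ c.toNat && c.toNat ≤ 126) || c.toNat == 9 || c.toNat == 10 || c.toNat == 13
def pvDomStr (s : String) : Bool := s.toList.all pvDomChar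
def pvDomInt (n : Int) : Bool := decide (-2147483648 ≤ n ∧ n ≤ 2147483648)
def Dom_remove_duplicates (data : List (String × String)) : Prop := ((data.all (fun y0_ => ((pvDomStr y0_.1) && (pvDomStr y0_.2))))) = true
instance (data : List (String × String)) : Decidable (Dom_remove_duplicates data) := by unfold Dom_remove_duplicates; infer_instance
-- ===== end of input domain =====

-- B replaces A's online best-so-far update with a group-then-reduce decomposition
-- (group keys by value, then pick min(keys, key=len) per group); objective: alternative.

-- ===== PORT A =====
def remove_duplicates (data : List (String × String)) : List (String × String) :=
  let unique_values :=
    data.foldl (fun (uv : PySem.Dict String String) kv =>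
      if ¬ (uv.contains kv.2 = true) then
        uv.insert kv.2 kv.1
      else
        let current_key := kv.1
        let existing_key := uv.getD kv.2 ""   -- unique_values[value]; the key is present on this branch
        if PySem.Str.len current_key < PySem.Str.len existing_key then
          uv.insert kv.2 current_key
        else uv) PySem.Dict.empty
  -- unique_data = {key: value for value, key in unique_values.items()}
  (unique_values.items.foldl (fun (d : PySem.Dict String String) p => d.insert p.2 p.1) PySem.Dict.empty).items

-- ===== PORT B =====
-- min(keys, key=len); Python raises on an empty list, which the groups loop never produces
def pvMinLenKey (ks : List String) : String :=
  match PySem.List.min? ks (fun s => PySem.Str.len s) with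
  | some m => m
  | none => ""

def remove_duplicates_alt (data : List (String × String)) : List (String × String) :=
  let groups :=
    data.foldl (fun (g : PySem.Dict String (List String)) kv =>
      g.modify kv.2 [] (fun ks => ks ++ [kv.1])) PySem.Dict.empty
  -- {min(keys, key=len): value for value, keys in groups.items()}
  (groups.items.foldl (fun (d : PySem.Dict String String) p => d.insert (pvMinLenKey p.2) p.1) PySem.Dict.empty).items

-- ===== PRECONDITION & SPEC =====
-- Pre_ excludes association lists with duplicate first components: A's parameter is a Python
-- dict, which cannot hold two entries with the same key, so such lists represent no input of A.
def Pre_remove_duplicates (data : List (String × String)) : Prop :=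
  (data.map Prod.fst).Nodup
instance (data : List (String × String)) : Decidable (Pre_remove_duplicates data) := by
  unfold Pre_remove_duplicates; infer_instance

def pvWitness_remove_duplicates : (List (String × String)) :=
  [("ab", "x"), ("c", "x"), ("d", "y")]

def Spec_remove_duplicates (data : List (String × String)) (out : List (String × String)) : Prop := out = remove_duplicates_alt data
instance (data : List (String × String)) (out : List (String × String)) : Decidable (Spec_remove_duplicates data out) := by unfold Spec_remove_duplicates; infer_instance

-- ===== CLAIM (what is proved, stated in full; the proofs are below) =====
def Claim_equal_remove_duplicates : Prop := ∀ (data : List (String × String)), Dom_remove_duplicates data → Pre_remove_duplicates data → Spec_remove_duplicates data (remove_duplicates data)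

-- ===== LEMMAS AND PROOFS =====

-- f maps one group entry (value, keys) to A's best-so-far entry (value, shortest key)
def pvF (p : String × List String) : String × String := (p.1, pvMinLenKey p.2)

theorem pvMinLenKey_singleton (k : String) : pvMinLenKey [k] = k := rfl

theorem pv_min?_snoc (ks : List String) (k : String) :
    PySem.List.min? (ks ++ [k]) (fun s => PySem.Str.len s) =
      match PySem.List.min? ks (fun s => PySem.Str.len s) with
      | none => some k
      | some m => if PySem.Str.len k < PySem.Str.len m then some k else some m := by
  cases hm : PySem.List.min? ks (fun s => PySem.Str.len s) with
  | none =>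
    rw [(PySem.List.min?_eq_none_iff ks _).mp hm]
    rfl
  | some m =>
    unfold PySem.List.min? at hm ⊢
    rw [List.foldl_append, hm]
    rfl

theorem pvMinLenKey_append (ks : List String) (k : String) (h : ks ≠ []) :
    pvMinLenKey (ks ++ [k]) =
      if PySem.Str.len k < PySem.Str.len (pvMinLenKey ks) then k else pvMinLenKey ks := by
  unfold pvMinLenKey
  rw [pv_min?_snoc]
  cases hm : PySem.List.min? ks (fun s => PySem.Str.len s) with
  | none =>
    exact absurd ((PySem.List.min?_eq_none_iff ks _).mp hm) h
  | some m =>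
    by_cases hlt : k.length < m.length <;> simp [hlt, PySem.Str.len]

-- the loop invariant: A's dict is the image of B's groups under pvF,
-- every group is nonempty, and the (shared) value-keys are distinct
def pvInv (uv : PySem.Dict String String) (g : PySem.Dict String (List String)) : Prop :=
  uv.items = g.items.map pvF ∧ (∀ p ∈ g.items, p.2 ≠ []) ∧ (g.items.map Prod.fst).Nodup

theorem pv_contains_of_inv (uv : PySem.Dict String String) (g : PySem.Dict String (List String))
    (h : uv.items = g.items.map pvF) (v : String) : uv.contains v = g.contains v := by
  simp only [PySem.Dict.contains, h, List.any_map]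
  rfl

theorem pv_step_inv (uv : PySem.Dict String String) (g : PySem.Dict String (List String))
    (kv : String × String) (hinv : pvInv uv g) :
    pvInv
      (if ¬ (uv.contains kv.2 = true) then
        uv.insert kv.2 kv.1
      else
        if PySem.Str.len kv.1 < PySem.Str.len (uv.getD kv.2 "") then
          uv.insert kv.2 kv.1
        else uv)
      (g.modify kv.2 [] (fun ks => ks ++ [kv.1])) := by
  obtain ⟨H1, H2, H3⟩ := hinv
  obtain ⟨k, v⟩ := kv
  have hcontains : uv.contains v = g.contains v := pv_contains_of_inv uv g H1 v
  by_cases hc : g.contains v = true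
  · -- value already present: locate its unique entry (v, ks) in g.items
    simp only [PySem.Dict.contains, List.any_eq_true] at hc
    obtain ⟨p, hpmem, hpv⟩ := hc
    obtain ⟨l₁, l₂, hdecomp⟩ := List.append_of_mem hpmem
    have hpv' : p.1 = v := by simpa using hpv
    obtain ⟨pk, ks⟩ := p
    simp only at hpv'
    subst pk
    have hks_ne : ks ≠ [] := H2 (v, ks) hpmem
    have hnods : v ∉ l₁.map Prod.fst ∧ v ∉ l₂.map Prod.fst := by
      have h3 := H3
      rw [hdecomp] at h3
      simp only [List.map_append, List.map_cons, List.nodup_append, List.nodup_cons] at h3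
      exact ⟨fun hm => (h3.2.2 v hm v (by simp)) rfl, h3.2.1.1⟩
    -- both dicts contain v
    have hgc : g.contains v = true := by
      simp only [PySem.Dict.contains, List.any_eq_true]
      exact ⟨(v, ks), hpmem, by simp⟩
    have huc : uv.contains v = true := hcontains.trans hgc
    -- g.getD v [] = ks  and  uv.getD v "" = pvMinLenKey ks
    have hfind : g.items.find? (fun p => p.1 == v) = some (v, ks) := by
      rw [hdecomp, List.find?_append]
      have h1 : l₁.find? (fun p => p.1 == v) = none := by
        rw [List.find?_eq_none]
        intro x hx
        simp only [beq_iff_eq]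
        intro hxv
        exact hnods.1 (List.mem_map.mpr ⟨x, hx, hxv⟩)
      rw [h1]
      simp
    have hgD : g.getD v [] = ks := by
      simp [PySem.Dict.getD, PySem.Dict.get?, hfind]
    have huD : uv.getD v "" = pvMinLenKey ks := by
      simp only [PySem.Dict.getD, PySem.Dict.get?, H1]
      rw [List.find?_map]
      have : ((fun p : String × String => p.1 == v) ∘ pvF) = (fun p : String × List String => p.1 == v) := by
        funext p; rfl
      rw [this, hfind]
      rfl
    -- both updates are in-place replacements of the single matching entry
    have hitems_g : (g.modify v [] (fun ks' => ks' ++ [k])).items =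
        l₁ ++ (v, ks ++ [k]) :: l₂ := by
      simp only [PySem.Dict.modify, hgD]
      rw [PySem.Dict.items_insert_of_contains _ _ hgc, hdecomp]
      simp only [List.map_append, List.map_cons]
      congr 1
      · conv_rhs => rw [← List.map_id l₁]
        apply List.map_congr_left
        intro x hx
        have : ¬ (x.1 = v) := fun hxv => hnods.1 (List.mem_map.mpr ⟨x, hx, hxv⟩)
        simp [this]
      · congr 1
        · simp
        · conv_rhs => rw [← List.map_id l₂]
          apply List.map_congr_left
          intro x hx
          have : ¬ (x.1 = v) := fun hxv => hnods.2 (List.mem_map.mpr ⟨x, hx, hxv⟩)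
          simp [this]
    have hitems_uv : ∀ w : String, (uv.insert v w).items =
        l₁.map pvF ++ (v, w) :: l₂.map pvF := by
      intro w
      rw [PySem.Dict.items_insert_of_contains _ _ huc, H1, hdecomp]
      simp only [List.map_append, List.map_cons]
      congr 1
      · rw [List.map_map]
        apply List.map_congr_left
        intro x hx
        have : ¬ ((pvF x).1 = v) := fun hxv => hnods.1 (List.mem_map.mpr ⟨x, hx, hxv⟩)
        simp only [Function.comp_apply]
        simp [this]
      · congr 1
        · simp [pvF]
        · rw [List.map_map]
          apply List.map_congr_left
          intro x hx
          have : ¬ ((pvF x).1 = v) := fun hxv => hnods.2 (List.mem_map.mpr ⟨x, hx, hxv⟩)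
          simp only [Function.comp_apply]
          simp [this]
    refine ⟨?_, ?_, ?_⟩
    · -- items equality
      rw [huc]
      simp only [huD, not_true, if_false]
      rw [hitems_g]
      simp only [List.map_append, List.map_cons, pvF]
      rw [pvMinLenKey_append ks k hks_ne]
      by_cases hlt : PySem.Str.len k < PySem.Str.len (pvMinLenKey ks)
      · rw [if_pos hlt, hitems_uv k]
        simp
        intro hle
        simp only [PySem.Str.len, String.length_toList] at hlt
        omega
      · rw [if_neg hlt, H1, hdecomp]
        simp [pvF]
        intro h
        simp only [PySem.Str.len, String.length_toList] at hlt
        omega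
    · -- groups stay nonempty
      rw [hitems_g]
      intro p hp
      rcases List.mem_append.mp hp with hp1 | hp2
      · exact H2 p (hdecomp ▸ (List.mem_append.mpr (Or.inl hp1)))
      · rcases List.mem_cons.mp hp2 with rfl | hp3
        · simp
        · exact H2 p (by rw [hdecomp]; exact List.mem_append.mpr (Or.inr (List.mem_cons_of_mem _ hp3)))
    · -- value-keys unchanged
      rw [hitems_g]
      have h3 := H3
      rw [hdecomp] at h3
      simpa using h3
  · -- new value: both dicts append
    have hgc : g.contains v = false := by simpa using hc
    have huc : uv.contains v = false := by rw [hcontains]; exact hgc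
    have hvnot : v ∉ g.items.map Prod.fst := by
      intro hmem
      obtain ⟨p, hp, hpv⟩ := List.mem_map.mp hmem
      have : g.contains v = true := by
        simp only [PySem.Dict.contains, List.any_eq_true]
        exact ⟨p, hp, by simp [hpv]⟩
      rw [hgc] at this; exact absurd this (by simp)
    have hgD : g.getD v [] = [] := PySem.Dict.getD_of_not_contains _ _ hgc
    refine ⟨?_, ?_, ?_⟩
    · rw [huc]
      simp only [Bool.false_eq_true, not_false_iff, if_true]
      simp only [PySem.Dict.modify, hgD, List.nil_append]
      rw [PySem.Dict.items_insert_of_not_contains _ _ hgc,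
          PySem.Dict.items_insert_of_not_contains _ _ huc, H1]
      simp [pvF, pvMinLenKey_singleton]
    · simp only [PySem.Dict.modify, hgD, List.nil_append]
      rw [PySem.Dict.items_insert_of_not_contains _ _ hgc]
      intro p hp
      rcases List.mem_append.mp hp with hp1 | hp2
      · exact H2 p hp1
      · rcases List.mem_cons.mp hp2 with rfl | h
        · simp
        · cases h
    · simp only [PySem.Dict.modify, hgD, List.nil_append]
      rw [PySem.Dict.items_insert_of_not_contains _ _ hgc]
      simp only [List.map_append, List.map_cons, List.map_nil]
      rw [List.nodup_append]
      exact ⟨H3, by simp, by intro a ha b hb he; simp at hb; subst hb; subst he; exact hvnot ha⟩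

theorem pv_loop_inv (rest : List (String × String)) :
    ∀ (uv : PySem.Dict String String) (g : PySem.Dict String (List String)), pvInv uv g →
    pvInv
      (rest.foldl (fun uv kv =>
        if ¬ (uv.contains kv.2 = true) then
          uv.insert kv.2 kv.1
        else
          if PySem.Str.len kv.1 < PySem.Str.len (uv.getD kv.2 "") then
            uv.insert kv.2 kv.1
          else uv) uv)
      (rest.foldl (fun g kv => g.modify kv.2 [] (fun ks => ks ++ [kv.1])) g) := by
  induction rest with
  | nil => intro uv g h; exact h
  | cons kv rest ih =>
    intro uv g h
    exact ih _ _ (pv_step_inv uv g kv h)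

-- ===== VERDICT (by name: the statement is the Claim_ definition above) =====
theorem remove_duplicates_spec : Claim_equal_remove_duplicates := by
  intro data _ _
  unfold Spec_remove_duplicates remove_duplicates remove_duplicates_alt
  dsimp only
  have hbase : pvInv PySem.Dict.empty PySem.Dict.empty := by
    refine ⟨rfl, ?_, ?_⟩ <;> simp [PySem.Dict.empty]
  have hinv := pv_loop_inv data PySem.Dict.empty PySem.Dict.empty hbase
  obtain ⟨H1, _, _⟩ := hinv
  rw [H1, List.foldl_map]
  rfl
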